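-- pv_equiv track=rewrite | github.com/UndocEng/fpp-eavesdrop | tools/audio2fseq.py | to_mono
-- ===== SOURCE A (Python) =====
-- def to_mono(samples, n_channels):
--     """Mix multi-channel audio down to mono."""
--     if n_channels == 1:
--         return samples
--     mono = []
--     for i in range(0, len(samples), n_channels):
--         chunk = samples[i : i + n_channels]
--         mono.append(sum(chunk) // len(chunk))
--     return mono
-- ===== SOURCE B (Python) =====
-- def to_mono(samples, n_channels):
--     """Mix multi-channel audio down to mono."""
--     if n_channels == 1:
--         return samples
--     mono = []
--     acc = 0
--     cnt = 0
--     for s in samples: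
--         acc += s
--         cnt += 1
--         if cnt == n_channels:
--             mono.append(acc // cnt)
--             acc = 0
--             cnt = 0
--     if cnt != 0:
--         mono.append(acc // cnt)
--     return mono
-- ===== Notes on version B (the rewrite author's own statement) =====
-- stated objective: alternative
-- what changed: Replaces the index-range loop with repeated slicing by a single element-wise pass maintaining a running sum and in-group count, flushing a group average whenever the count reaches n_channels and once more for a trailing partial group.
-- outside the precondition, e.g. on to_mono([1, 2], -2): A returns [], B returns [1]; on to_mono([1, 2], 0): A raises ValueError, B returns [1]
import Mathlib
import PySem

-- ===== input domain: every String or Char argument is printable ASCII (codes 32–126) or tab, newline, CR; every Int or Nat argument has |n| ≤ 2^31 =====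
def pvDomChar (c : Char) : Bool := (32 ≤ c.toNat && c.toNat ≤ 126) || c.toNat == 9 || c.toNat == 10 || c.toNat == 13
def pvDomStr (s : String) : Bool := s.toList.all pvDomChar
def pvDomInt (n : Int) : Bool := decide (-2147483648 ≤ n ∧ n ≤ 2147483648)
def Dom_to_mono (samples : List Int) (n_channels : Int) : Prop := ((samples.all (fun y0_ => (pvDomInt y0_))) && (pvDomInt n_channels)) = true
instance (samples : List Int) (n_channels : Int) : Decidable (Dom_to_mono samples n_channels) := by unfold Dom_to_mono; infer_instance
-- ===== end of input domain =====

-- B replaces A's slice-per-chunk index-range loop by one element-wise pass with a running sum and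
-- in-group count (same O(n) cost, different decomposition); equivalence proved for n_channels ≥ 1.

-- ===== PORT A =====
def to_mono (samples : List Int) (n_channels : Int) : List Int :=
  if n_channels == 1 then samples
  else
    (PySem.List.pyRange 0 (samples.length : Int) n_channels).foldl
      (fun mono i =>
        let chunk := PySem.List.slice samples (some i) (some (i + n_channels))
        mono ++ [PySem.Int.floordiv (chunk.foldl (· + ·) 0) (chunk.length : Int)]) []

-- ===== PORT B =====
-- one step of B's loop body: add the sample, bump the count, flush a full group
def bstep (n : Int) (st : List Int × Int × Int) (s : Int) : List Int × Int × Int :=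
  let acc := st.2.1 + s
  let cnt := st.2.2 + 1
  if cnt == n then (st.1 ++ [PySem.Int.floordiv acc cnt], 0, 0) else (st.1, acc, cnt)

-- B's epilogue: flush the trailing partial group, if any
def bfinish (st : List Int × Int × Int) : List Int :=
  if st.2.2 ≠ 0 then st.1 ++ [PySem.Int.floordiv st.2.1 st.2.2] else st.1

def to_mono_alt (samples : List Int) (n_channels : Int) : List Int :=
  if n_channels == 1 then samples
  else bfinish (samples.foldl (bstep n_channels) ([], 0, 0))

-- ===== PRECONDITION & SPEC =====
-- Pre_ restricts to the natural domain n_channels ≥ 1 of a channel count: A raises ValueError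
-- (range step 0) at n_channels = 0, and for negative n_channels A's empty range accidentally
-- returns [] — both outside the function's purpose.
def Pre_to_mono (samples : List Int) (n_channels : Int) : Prop := 1 ≤ n_channels
instance (samples : List Int) (n_channels : Int) : Decidable (Pre_to_mono samples n_channels) := by unfold Pre_to_mono; infer_instance
def pvWitness_to_mono : List Int × Int := ([7, 1, 4, 9, 5], 2)

def Spec_to_mono (samples : List Int) (n_channels : Int) (out : List Int) : Prop := out = to_mono_alt samples n_channels
instance (samples : List Int) (n_channels : Int) (out : List Int) : Decidable (Spec_to_mono samples n_channels out) := by unfold Spec_to_mono; infer_instance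

-- ===== CLAIM (what is proved, stated in full; the proofs are below) =====
def Claim_equal_to_mono : Prop := ∀ (samples : List Int) (n_channels : Int), Dom_to_mono samples n_channels → Pre_to_mono samples n_channels → Spec_to_mono samples n_channels (to_mono samples n_channels)

-- ===== LEMMAS AND PROOFS =====

-- floored average of a (nonempty) group, the value both programs append
def gavg (l : List Int) : Int := PySem.Int.floordiv (l.foldl (· + ·) 0) (l.length : Int)

-- the common reference: floored averages of successive chunks of size m+1 (last one possibly shorter)
def chunkAvg (m : Nat) : List Int → List Int
  | [] => []
  | x :: xs => gavg (x :: xs.take m) :: chunkAvg m (xs.drop m)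
termination_by l => l.length
decreasing_by simp

lemma chunkAvg_nil (m : Nat) : chunkAvg m [] = [] := by rw [chunkAvg]

lemma chunkAvg_cons_eq (m : Nat) (l : List Int) (h : l ≠ []) :
    chunkAvg m l = gavg (l.take (m + 1)) :: chunkAvg m (l.drop (m + 1)) := by
  cases l with
  | nil => exact absurd rfl h
  | cons x xs => rw [chunkAvg]; simp

-- a positive-step range over a nonempty length splits off its first index
lemma pyRange_chunk (s len : Nat) (hlen : 0 < len) :
    PySem.List.pyRange 0 (len : Int) ((s : Int) + 1) =
      0 :: (PySem.List.pyRange 0 ((len - (s + 1) : Nat) : Int) ((s : Int) + 1)).map (· + ((s : Int) + 1)) := by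
  have hs : (0:Int) < (s:Int) + 1 := by positivity
  rw [PySem.List.pyRange_of_pos _ _ hs, PySem.List.pyRange_of_pos _ _ hs]
  have hcast : ∀ (a : Nat), ((a : Int) - 0 + ((s:Int)+1) - 1) / ((s:Int)+1) = ((a + s) / (s+1) : Nat) := by
    intro a
    have h1 : (a : Int) - 0 + ((s:Int)+1) - 1 = ((a + s : Nat) : Int) := by push_cast; ring
    have h2 : ((s:Int)+1) = ((s+1 : Nat) : Int) := by push_cast; ring
    rw [h1, h2, ← Int.natCast_div]
  have hN : (if (0:Int) < (len:Int) then (((len:Int) - 0 + ((s:Int)+1) - 1) / ((s:Int)+1)).toNat else 0)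
      = (len + s) / (s+1) := by
    rw [if_pos (by exact_mod_cast hlen), hcast len, Int.toNat_natCast]
  rw [hN]
  by_cases hc : s + 1 < len
  · have hM : (if (0:Int) < ((len - (s+1) : Nat) : Int) then ((((len - (s+1) : Nat) : Int) - 0 + ((s:Int)+1) - 1) / ((s:Int)+1)).toNat else 0)
        = (len - 1) / (s+1) := by
      rw [if_pos (by exact_mod_cast Nat.sub_pos_of_lt hc), hcast, Int.toNat_natCast]
      congr 1
      omega
    rw [hM]
    have hNval : (len + s) / (s+1) = (len - 1) / (s+1) + 1 := by
      have : len + s = (len - 1) + (s+1) := by omega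
      rw [this, Nat.add_div_right _ (by omega)]
    rw [hNval, List.range_succ_eq_map, List.map_cons, List.map_map, List.map_map]
    refine congrArg₂ _ (by simp) (List.map_congr_left ?_)
    intro k _
    simp [Function.comp]
    ring
  · have h0 : len - (s+1) = 0 := by omega
    have hM : (if (0:Int) < ((len - (s+1) : Nat) : Int) then ((((len - (s+1) : Nat) : Int) - 0 + ((s:Int)+1) - 1) / ((s:Int)+1)).toNat else 0) = 0 := by
      rw [h0]; simp
    rw [hM]
    have hNval : (len + s) / (s+1) = 1 := by
      have h1 : len + s = (s+1) * 1 + (len - 1) := by omega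
      rw [h1, Nat.mul_add_div (by omega), Nat.div_eq_of_lt (by omega)]
    rw [hNval]
    simp

-- A's fold over range(0, len(samples), m+1) with per-chunk slicing computes chunkAvg
lemma A_loop (m : Nat) : ∀ (k : Nat) (samples acc : List Int), samples.length ≤ k →
    (PySem.List.pyRange 0 (samples.length : Int) ((m : Int) + 1)).foldl
      (fun mono i =>
        let chunk := PySem.List.slice samples (some i) (some (i + ((m : Int) + 1)))
        mono ++ [PySem.Int.floordiv (chunk.foldl (· + ·) 0) (chunk.length : Int)]) acc
      = acc ++ chunkAvg m samples := by
  intro k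
  induction k with
  | zero =>
    intro samples acc hk
    have : samples = [] := List.eq_nil_of_length_eq_zero (by omega)
    subst this
    simp [PySem.List.pyRange_of_pos _ _ (by positivity : (0:Int) < (m:Int)+1), chunkAvg_nil]
  | succ k ih =>
    intro samples acc hk
    cases samples with
    | nil => simp [PySem.List.pyRange_of_pos _ _ (by positivity : (0:Int) < (m:Int)+1), chunkAvg_nil]
    | cons x xs =>
      have hlen : 0 < (x :: xs).length := by simp
      rw [pyRange_chunk m _ hlen, List.foldl_cons]
      have hhead : PySem.List.slice (x :: xs) none (some ((m:Int)+1)) = (x :: xs).take (m+1) := by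
        have e : ((m:Int)+1) = ((m+1 : Nat) : Int) := by push_cast; ring
        rw [e, PySem.List.slice_to_natCast]
      rw [List.foldl_map]
      rw [PySem.List.foldl_congr_mem _ _
        (fun mono (i : Int) =>
          let chunk := PySem.List.slice ((x :: xs).drop (m+1)) (some i) (some (i + ((m : Int) + 1)))
          mono ++ [PySem.Int.floordiv (chunk.foldl (· + ·) 0) (chunk.length : Int)]) _
        (by
          intro acc' i hi
          have hi0 : 0 ≤ i := by
            have := (PySem.List.mem_pyRange_iff_of_pos (by positivity : (0:Int) < (m:Int)+1) i).1 hi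
            omega
          obtain ⟨j, rfl⟩ : ∃ j : Nat, i = (j : Int) := ⟨i.toNat, by omega⟩
          have e1 : (j : Int) + ((m:Int)+1) = ((j + (m+1) : Nat) : Int) := by push_cast; ring
          have e2' : ((j + (m+1) : Nat) : Int) + ((m:Int)+1) = ((j + (m+1) + (m+1) : Nat) : Int) := by push_cast; ring
          have n1 : j + (m+1) - j = m+1 := by omega
          have n2 : j + (m+1) + (m+1) - (j + (m+1)) = m+1 := by omega
          have n3 : m + 1 + j = j + (m+1) := by omega
          simp only [e1, e2', PySem.List.slice_natCast, List.drop_drop, n1, n2, n3])]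
      have hdroplen : (((x :: xs).drop (m+1)).length : Int) = ((((x :: xs).length - (m+1) : Nat)) : Int) := by
        simp
      rw [← hdroplen]
      have hkb : ((x :: xs).drop (m+1)).length ≤ k := by
        simp only [List.length_drop]
        have := hk
        simp at this
        omega
      rw [ih ((x :: xs).drop (m+1)) _ hkb]
      conv_rhs => rw [chunkAvg_cons_eq m (x :: xs) (by simp)]
      simp [hhead, gavg, List.append_assoc]

-- B's single pass (running sum + in-group count, generalised over a partial group) computes chunkAvg
lemma B_loop (m : Nat) (xs : List Int) : ∀ (pre mono : List Int), pre.length ≤ m →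
    bfinish (xs.foldl (bstep ((m : Int) + 1)) (mono, pre.foldl (· + ·) 0, (pre.length : Int)))
      = mono ++ chunkAvg m (pre ++ xs) := by
  induction xs with
  | nil =>
    intro pre mono hp
    cases pre with
    | nil => simp [bfinish, chunkAvg_nil]
    | cons p ps =>
      have hp' : ps.length + 1 ≤ m := by simpa using hp
      have hne : ((p :: ps).length : Int) ≠ 0 := by simp; omega
      simp only [List.foldl_nil, List.append_nil, bfinish, if_pos hne]
      rw [chunkAvg_cons_eq m _ (by simp)]
      have h1 : (p :: ps).take (m+1) = p :: ps := List.take_of_length_le (by simp; omega)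
      have h2 : (p :: ps).drop (m+1) = [] := List.drop_eq_nil_of_le (by simp; omega)
      rw [h1, h2, chunkAvg_nil, gavg]
  | cons x xs ih =>
    intro pre mono hp
    rw [List.foldl_cons]
    by_cases hfull : pre.length = m
    · have hcond : ((pre.length : Int) + 1 == (m : Int) + 1) = true := by
        simp [hfull]
      have hstep : bstep ((m : Int) + 1) (mono, pre.foldl (· + ·) 0, (pre.length : Int)) x
          = (mono ++ [gavg (pre ++ [x])], 0, 0) := by
        simp only [bstep, hcond, if_pos]
        simp [gavg, hfull]
      rw [hstep]
      have := ih [] (mono ++ [gavg (pre ++ [x])]) (by simp)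
      simp only [List.foldl_nil, List.length_nil, Nat.cast_zero, List.nil_append] at this
      rw [this]
      have hne : pre ++ x :: xs ≠ [] := by simp
      rw [chunkAvg_cons_eq m _ hne]
      have hsplit : pre ++ x :: xs = (pre ++ [x]) ++ xs := by simp
      have hlen1 : (pre ++ [x]).length = m + 1 := by simp [hfull]
      have h1 : (pre ++ x :: xs).take (m+1) = pre ++ [x] := by
        rw [hsplit, List.take_left' hlen1]
      have h2 : (pre ++ x :: xs).drop (m+1) = xs := by
        rw [hsplit, List.drop_left' hlen1]
      rw [h1, h2]
      simp
    · have hcond : ((pre.length : Int) + 1 == (m : Int) + 1) = false := by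
        simp
        omega
      have hstep : bstep ((m : Int) + 1) (mono, pre.foldl (· + ·) 0, (pre.length : Int)) x
          = (mono, (pre ++ [x]).foldl (· + ·) 0, ((pre ++ [x]).length : Int)) := by
        simp only [bstep, hcond]
        simp
      rw [hstep, ih (pre ++ [x]) mono (by simp; omega)]
      simp

-- ===== VERDICT (by name: the statement is the Claim_ definition above) =====
theorem to_mono_spec : Claim_equal_to_mono := by
  intro samples n _ hpre
  unfold Spec_to_mono to_mono to_mono_alt
  by_cases h1 : n = 1
  · simp [h1]
  · have h2 : 2 ≤ n := by
      unfold Pre_to_mono at hpre; omega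
    have hm : n = ((n.toNat - 1 : Nat) : Int) + 1 := by omega
    rw [if_neg (by simpa using h1), if_neg (by simpa using h1), hm]
    rw [A_loop (n.toNat - 1) samples.length samples [] le_rfl]
    have := B_loop (n.toNat - 1) samples [] [] (by simp)
    simp only [List.foldl_nil, List.length_nil, Nat.cast_zero, List.nil_append] at this
    rw [this]
    simp
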